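-- pv_equiv track=rewrite | github.com/DenislavDyakov/HackBulgaria-Python-101-Solutions | C01P01-iban_formatter.py | iban_formatter
-- ===== SOURCE A (Python) =====
-- def iban_formatter(iban):
--      result = []
--      counter = 1
--
--      for char in iban:
--           if char == " ":
--                continue
--
--           result.append(char)
--
--           if counter == 4:
--                result.append(" ")
--                counter = 0
--           counter += 1
--
--      return "".join(result)
-- ===== SOURCE B (Python) =====
-- def iban_formatter(iban):
--     cleaned = iban.replace(' ', '')
--     pieces = []
--     for i in range(0, len(cleaned), 4):
--         pieces.append(cleaned[i:i+4])
--         if i + 4 <= len(cleaned):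
--             pieces.append(' ')
--     return ''.join(pieces)
-- ===== Notes on version B (the rewrite author's own statement) =====
-- stated objective: idiomatic
-- what changed: Replaces the per-character counter state machine by stripping spaces once with str.replace and slicing the cleaned string into stride-4 chunks, appending a space after each completed 4-chunk.
import Mathlib
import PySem

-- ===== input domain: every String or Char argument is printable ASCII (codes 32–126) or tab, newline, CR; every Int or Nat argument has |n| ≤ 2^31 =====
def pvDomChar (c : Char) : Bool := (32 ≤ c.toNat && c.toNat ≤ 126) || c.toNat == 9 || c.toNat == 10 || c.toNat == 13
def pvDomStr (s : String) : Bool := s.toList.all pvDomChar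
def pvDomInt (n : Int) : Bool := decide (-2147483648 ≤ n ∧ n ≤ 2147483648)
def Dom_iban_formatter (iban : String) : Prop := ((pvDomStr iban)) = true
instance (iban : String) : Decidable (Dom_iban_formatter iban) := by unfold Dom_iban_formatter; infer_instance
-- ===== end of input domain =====

-- B strips spaces once and slices the cleaned string into stride-4 chunks (space after each
-- completed 4-chunk) instead of A's per-character counter state machine; objective: idiomatic.

-- ===== PORT A =====
-- one iteration of A's for-loop body over state (result, counter)
def ibanStepA (st : List Char × Int) (char : Char) : List Char × Int :=
  if char = ' ' then st
  else
    let result := st.1 ++ [char]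
    let (result, counter) :=
      if st.2 = (4 : Int) then (result ++ [' '], (0 : Int)) else (result, st.2)
    (result, counter + 1)

def iban_formatter (iban : String) : String :=
  String.ofList (iban.toList.foldl ibanStepA ([], 1)).1

-- ===== PORT B =====
-- B's loop over chunk starts i = 0, 4, 8, …: transcribed as structural recursion peeling
-- one 4-chunk (cleaned[i:i+4]) per step; a space follows exactly the full chunks.
def ibanChunks (l : List Char) : List Char :=
  if 4 ≤ l.length then l.take 4 ++ ' ' :: ibanChunks (l.drop 4)
  else l
termination_by l.length
decreasing_by simp; omega

def iban_formatter_alt (iban : String) : String :=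
  String.ofList (ibanChunks (iban.toList.filter (fun c => c ≠ ' ')))

-- ===== PRECONDITION & SPEC =====
def Spec_iban_formatter (iban : String) (out : String) : Prop := out = iban_formatter_alt iban
instance (iban : String) (out : String) : Decidable (Spec_iban_formatter iban out) := by unfold Spec_iban_formatter; infer_instance

-- ===== CLAIM (what is proved, stated in full; the proofs are below) =====
def Claim_equal_iban_formatter : Prop := ∀ (iban : String), Dom_iban_formatter iban → Spec_iban_formatter iban (iban_formatter iban)

-- ===== LEMMAS AND PROOFS =====

-- A's fold ignores spaces, so it equals the fold over the space-filtered list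
theorem foldA_filter (l : List Char) (st : List Char × Int) :
    l.foldl ibanStepA st = (l.filter (fun c => c ≠ ' ')).foldl ibanStepA st := by
  induction l generalizing st with
  | nil => rfl
  | cons ch l ih =>
    by_cases h : ch = ' '
    · subst h
      simp [List.filter, ibanStepA, ih]
    · simp [List.filter, h, ih]

-- partial chunk with k slots left in the current group
def ibanChunksFrom (k : Nat) (l : List Char) : List Char :=
  if k ≤ l.length then l.take k ++ ' ' :: ibanChunks (l.drop k)
  else l

theorem ibanChunksFrom_four (l : List Char) : ibanChunksFrom 4 l = ibanChunks l := by
  rw [ibanChunks, ibanChunksFrom]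

theorem ibanChunksFrom_zero (l : List Char) : ibanChunksFrom 0 l = ' ' :: ibanChunks l := by
  simp [ibanChunksFrom]

theorem ibanChunksFrom_cons (k : Nat) (hk : 1 ≤ k) (ch : Char) (l : List Char) :
    ibanChunksFrom k (ch :: l) = ch :: ibanChunksFrom (k - 1) l := by
  unfold ibanChunksFrom
  obtain ⟨k, rfl⟩ : ∃ m, k = m + 1 := ⟨k - 1, by omega⟩
  by_cases h : k ≤ l.length
  · simp [h, Nat.succ_le_succ h]
  · have : ¬ (k + 1 ≤ l.length + 1) := by omega
    simp [h, this]

-- loop invariant: with counter c ∈ [1,4], the rest of A's loop appends ibanChunksFrom (5-c)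
theorem foldA_chunks (l : List Char) (res : List Char) (c : Int)
    (hc1 : 1 ≤ c) (hc4 : c ≤ 4) (hsp : ∀ ch ∈ l, ch ≠ ' ') :
    (l.foldl ibanStepA (res, c)).1 = res ++ ibanChunksFrom (5 - c).toNat l := by
  induction l generalizing res c with
  | nil => simp [ibanChunksFrom, show ¬ ((5 - c).toNat ≤ 0) by omega]
  | cons ch l ih =>
    have hch : ch ≠ ' ' := hsp ch (List.mem_cons_self ..)
    have hsp' : ∀ ch ∈ l, ch ≠ ' ' := fun x hx => hsp x (List.mem_cons_of_mem _ hx)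
    by_cases h4 : c = (4 : Int)
    · subst h4
      simp only [List.foldl_cons, ibanStepA, hch, if_false]
      rw [ih _ _ (by norm_num) (by norm_num) hsp']
      have : ((5 : Int) - 4).toNat = 1 := by norm_num
      rw [this, ibanChunksFrom_cons 1 (by norm_num)]
      simp [ibanChunksFrom_zero, ibanChunksFrom_four]
    · simp only [List.foldl_cons, ibanStepA, hch, if_false, if_neg h4]
      rw [ih _ _ (by omega) (by omega) hsp']
      have h1 : 1 ≤ (5 - c).toNat := by omega
      rw [ibanChunksFrom_cons _ h1]
      have : (5 - c).toNat - 1 = (5 - (c + 1)).toNat := by omega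
      simp [this]

-- ===== VERDICT (by name: the statement is the Claim_ definition above) =====
theorem iban_formatter_spec : Claim_equal_iban_formatter := by
  intro iban _
  unfold Spec_iban_formatter iban_formatter iban_formatter_alt
  rw [foldA_filter, foldA_chunks _ _ _ (by norm_num) (by norm_num)
      (by intro ch hch; have := (List.mem_filter.mp hch).2; simpa using this)]
  have : ((5 : Int) - 1).toNat = 4 := by decide
  rw [this, ibanChunksFrom_four, List.nil_append]
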